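-- pv_equiv track=rewrite | github.com/mirozy13/Python_tasks | Part5/Task5.py | check
-- ===== SOURCE A (Python) =====
-- def check(three_words):
--     count = 0
--     for w in three_words.split():
--         if w.isalpha():
--             count += 1
--         else:
--             count = 0
--         if count == 3:
--             return True
--     return False
-- ===== SOURCE B (Python) =====
-- def check(three_words):
--     flags = [w.isalpha() for w in three_words.split()]
--     return any(a and b and c for a, b, c in zip(flags, flags[1:], flags[2:]))
-- ===== Notes on version B (the rewrite author's own statement) =====
-- stated objective: alternative
-- what changed: Replaces A's stateful running counter (incremented and reset in one early-returning loop) with a build-then-scan structure: precompute a boolean isalpha flags list and test every sliding window of three consecutive flags via zip.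
import Mathlib
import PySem

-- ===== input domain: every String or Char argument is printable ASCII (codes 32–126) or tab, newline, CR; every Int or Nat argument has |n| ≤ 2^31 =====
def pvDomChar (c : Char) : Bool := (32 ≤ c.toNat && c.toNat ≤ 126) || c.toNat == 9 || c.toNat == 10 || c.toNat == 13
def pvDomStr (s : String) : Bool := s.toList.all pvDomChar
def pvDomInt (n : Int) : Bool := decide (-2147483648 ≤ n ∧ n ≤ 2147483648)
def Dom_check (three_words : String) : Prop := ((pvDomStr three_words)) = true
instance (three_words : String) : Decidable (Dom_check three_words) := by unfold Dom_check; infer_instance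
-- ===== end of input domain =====

-- B replaces A's stateful running counter with precomputed isalpha flags scanned in sliding windows of three (alternative decomposition, same cost).


-- ===== PORT A =====
-- the for-loop with its early 'return True': count is incremented or reset, 3 returns
def checkLoop : List String → Int → Bool
  | [], _ => false
  | w :: ws, count =>
    let count' := if PySem.Str.strIsalpha w then count + 1 else 0
    if count' == 3 then true else checkLoop ws count'

def check (three_words : String) : Bool :=
  checkLoop (PySem.Str.split₀ three_words) 0

-- ===== PORT B =====
def check_alt (three_words : String) : Bool :=
  let flags := (PySem.Str.split₀ three_words).map PySem.Str.strIsalpha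
  ((flags.zip ((PySem.List.slice flags (some 1) none).zip
               (PySem.List.slice flags (some 2) none)))).any
    (fun p => p.1 && p.2.1 && p.2.2)

-- ===== PRECONDITION & SPEC =====
def Spec_check (three_words : String) (out : Bool) : Prop := out = check_alt three_words
instance (three_words : String) (out : Bool) : Decidable (Spec_check three_words out) := by unfold Spec_check; infer_instance

-- ===== CLAIM (what is proved, stated in full; the proofs are below) =====
def Claim_equal_check : Prop := ∀ (three_words : String), Dom_check three_words → Spec_check three_words (check three_words)

-- ===== LEMMAS AND PROOFS =====

/-- "some window of three consecutive flags is all true", by structural recursion. -/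
def trip : List Bool → Bool
  | a :: b :: c :: r => (a && b && c) || trip (b :: c :: r)
  | _ => false

/-- "the first k flags exist and are all true". -/
def att (k : Nat) (l : List Bool) : Bool := decide (k ≤ l.length) && (l.take k).all id

theorem trip_cons_true (t : List Bool) : trip (true :: t) = (att 2 t || trip t) := by
  match t with
  | [] => rfl
  | [b] => simp [trip, att]
  | b :: c :: r => simp [trip, att, List.take, List.all, Bool.and_comm]

theorem trip_cons_false (t : List Bool) : trip (false :: t) = trip t := by
  match t with
  | [] => rfl
  | [b] => simp [trip]
  | b :: c :: r => simp [trip]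

theorem att_succ_cons (k : Nat) (f : Bool) (t : List Bool) :
    att (k + 1) (f :: t) = (f && att k t) := by
  simp [att, List.take]
  cases f <;> simp [Bool.and_comm]

theorem att_three_imp_trip (l : List Bool) (h : att 3 l = true) : trip l = true := by
  match l with
  | [] => simp [att] at h
  | [a] => simp [att] at h
  | [a, b] => simp [att] at h
  | a :: b :: c :: r =>
    simp [att, List.take] at h
    simp [trip, h]

theorem att_two_imp_att_one (l : List Bool) (h : att 2 l = true) : att 1 l = true := by
  match l with
  | [] => simp [att] at h
  | a :: t =>
    rw [att_succ_cons] at h ⊢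
    simp_all [att]

theorem trip_or_att3 (l : List Bool) : (trip l || att 3 l) = trip l := by
  cases h : att 3 l
  · simp
  · simp [att_three_imp_trip l h]

/-- invariant of A's loop: with counter c ∈ {0,1,2} it succeeds iff some later
    window of three is all alphabetic, or the first 3−c words extend the run. -/
theorem checkLoop_eq (ws : List String) :
    ∀ (c : Int), (c = 0 ∨ c = 1 ∨ c = 2) →
      checkLoop ws c = (trip (ws.map PySem.Str.strIsalpha)
        || att (3 - c).toNat (ws.map PySem.Str.strIsalpha)) := by
  induction ws with
  | nil => rintro c (rfl | rfl | rfl) <;> simp [checkLoop, trip, att]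
  | cons w ws ih =>
    have hfls : ∀ k, 1 ≤ k → att k (false :: ws.map PySem.Str.strIsalpha) = false := by
      intro k hk
      obtain ⟨j, rfl⟩ := Nat.exists_eq_add_of_le hk
      rw [Nat.add_comm, att_succ_cons]; simp
    rintro c (rfl | rfl | rfl) <;> simp only [checkLoop, List.map] <;>
      cases hf : PySem.Str.strIsalpha w
    · -- c = 0, non-alphabetic
      rw [if_neg (by simp), if_neg (by decide), ih 0 (Or.inl rfl), trip_cons_false,
        show ((3:Int) - 0).toNat = 3 from rfl, trip_or_att3, hfls 3 (by omega)]
      simp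
    · -- c = 0, alphabetic
      rw [if_pos rfl, if_neg (by decide), show (0:Int)+1 = 1 from rfl, ih 1 (Or.inr (Or.inl rfl)), trip_cons_true,
        show ((3:Int) - 0).toNat = 2 + 1 from rfl, att_succ_cons,
        show ((3:Int) - 1).toNat = 2 from rfl]
      simp [Bool.or_comm, Bool.or_left_comm]
    · -- c = 1, non-alphabetic
      rw [if_neg (by simp), if_neg (by decide), ih 0 (Or.inl rfl), trip_cons_false,
        show ((3:Int) - 0).toNat = 3 from rfl, trip_or_att3,
        show ((3:Int) - 1).toNat = 2 from rfl, hfls 2 (by omega)]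
      simp
    · -- c = 1, alphabetic
      rw [if_pos rfl, if_neg (by decide), show (1:Int)+1 = 2 from rfl, ih 2 (Or.inr (Or.inr rfl)), trip_cons_true,
        show ((3:Int) - 1).toNat = 1 + 1 from rfl, att_succ_cons,
        show ((3:Int) - 2).toNat = 1 from rfl]
      cases h2 : att 2 (ws.map PySem.Str.strIsalpha)
      · simp
      · simp [att_two_imp_att_one _ h2]
    · -- c = 2, non-alphabetic
      rw [if_neg (by simp), if_neg (by decide), ih 0 (Or.inl rfl), trip_cons_false,
        show ((3:Int) - 0).toNat = 3 from rfl, trip_or_att3,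
        show ((3:Int) - 2).toNat = 1 from rfl, hfls 1 (by omega)]
      simp
    · -- c = 2, alphabetic: early return True
      rw [if_pos rfl, if_pos (by decide),
        show ((3:Int) - 2).toNat = 0 + 1 from rfl, att_succ_cons]
      simp [att]

/-- B's zip-of-three-shifted-copies scan computes exactly `trip`. -/
theorem zip_any_eq_trip (l : List Bool) :
    ((l.zip ((l.drop 1).zip (l.drop 2)))).any (fun p => p.1 && p.2.1 && p.2.2) = trip l := by
  match l with
  | [] => rfl
  | [a] => rfl
  | [a, b] => rfl
  | a :: b :: c :: r =>
    simp only [List.drop, List.zip, List.zipWith, List.any, trip]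
    rw [← zip_any_eq_trip (b :: c :: r)]
    simp [List.zip]

-- ===== VERDICT (by name: the statement is the Claim_ definition above) =====
theorem check_spec : Claim_equal_check := by
  intro s _
  unfold Spec_check check check_alt
  rw [checkLoop_eq _ 0 (Or.inl rfl), show ((3:Int) - 0).toNat = 3 from rfl, trip_or_att3]
  simp only [PySem.List.slice_from_one,
    show ∀ (l : List Bool), PySem.List.slice l (some 2) none = l.drop 2 from
      fun l => PySem.List.slice_from_natCast (a := 2) l,
    ← List.drop_one, ← zip_any_eq_trip]
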